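-- pv_equiv track=rewrite | github.com/nate-flasher/Project-Work | course/Freshman_Year/cos120/LABTESTS/LABTEST2/LT02Template.py | findOddsEvens
-- ===== SOURCE A (Python) =====
-- def findOddsEvens(LoL):
--     evenList=[]
--     oddList=[]
--     randomList=[]
--     randomList2=[]
--     newDict={}
--     for aList in LoL:
--         for number in aList:
--             if number%2==0:
--                 randomList.append(number)
--             else:
--                 randomList2.append(number)
--             for aNumber in randomList2:
--                 if aNumber not in oddList:
--                     oddList.append(aNumber)
--                     newDict["odds"]=oddList
--             for aNumber in randomList:
--                 if aNumber not in evenList: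
--                     evenList.append(aNumber)
--                     newDict["evens"]=evenList
--
--     return newDict
-- ===== SOURCE B (Python) =====
-- def findOddsEvens(LoL):
--     # dedup the flattened input once (first occurrences, in order)
--     seen = []
--     for sub in LoL:
--         for n in sub:
--             if n not in seen:
--                 seen.append(n)
--     # one grouping pass: each parity group's key appears when its first member arrives
--     d = {}
--     for n in seen:
--         d.setdefault("evens" if n % 2 == 0 else "odds", []).append(n)
--     return d
-- ===== Notes on version B (the rewrite author's own statement) =====
-- stated objective: faster
-- what changed: A classifies each number and then re-scans its full evens/odds candidate lists (with membership tests) after every single element; B dedups the flattened input once and then makes one grouping pass over the deduped sequence with dict.setdefault(...).append, so each parity group's key appears when its first member arrives.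
import Mathlib
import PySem

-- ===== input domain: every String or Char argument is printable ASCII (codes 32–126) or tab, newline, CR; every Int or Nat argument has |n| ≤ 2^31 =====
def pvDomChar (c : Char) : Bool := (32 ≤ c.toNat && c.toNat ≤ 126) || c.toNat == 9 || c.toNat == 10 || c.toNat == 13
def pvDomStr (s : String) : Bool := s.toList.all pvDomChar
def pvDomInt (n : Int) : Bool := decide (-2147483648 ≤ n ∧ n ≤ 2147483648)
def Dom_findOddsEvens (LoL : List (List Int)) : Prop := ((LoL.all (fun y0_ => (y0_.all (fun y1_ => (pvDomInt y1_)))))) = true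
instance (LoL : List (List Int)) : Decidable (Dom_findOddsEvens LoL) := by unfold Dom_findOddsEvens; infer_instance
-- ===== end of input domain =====

-- B dedups the flattened input once and then groups it in one setdefault/append pass,
-- instead of A's per-element rescans of its growing evens/odds lists; same return value.

-- ===== PORT A =====
-- A's repeated inner loop body: 'for aNumber in <src>: if aNumber not in <dst>: dst.append(aNumber); newDict[k] = dst'
def pvDStep (k : String) (p : List Int × PySem.Dict String (List Int)) (a : Int) :
    List Int × PySem.Dict String (List Int) :=
  if a ∈ p.1 then p else (p.1 ++ [a], p.2.insert k (p.1 ++ [a]))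

-- the body of A's 'for number in aList' loop, over state (evenList, oddList, randomList, randomList2, newDict)
def pvStepA (st : List Int × List Int × List Int × List Int × PySem.Dict String (List Int))
    (number : Int) : List Int × List Int × List Int × List Int × PySem.Dict String (List Int) :=
  match st with
  | (evenList, oddList, randomList, randomList2, newDict) =>
    let pr := if PySem.Int.mod number 2 == 0 then (randomList ++ [number], randomList2)
              else (randomList, randomList2 ++ [number])
    let o := pr.2.foldl (pvDStep "odds") (oddList, newDict)
    let e := pr.1.foldl (pvDStep "evens") (evenList, o.2)
    (e.1, o.1, pr.1, pr.2, e.2)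

def findOddsEvens (LoL : List (List Int)) : List (String × List Int) :=
  (LoL.foldl (fun st aList => aList.foldl pvStepA st)
    ([], [], [], [], PySem.Dict.empty)).2.2.2.2.items

-- ===== PORT B =====
-- B's dedup loop body: 'if n not in seen: seen.append(n)'
def pvSeenStep (acc : List Int) (n : Int) : List Int :=
  if n ∈ acc then acc else acc ++ [n]

-- B's grouping body: 'd.setdefault("evens" if n % 2 == 0 else "odds", []).append(n)'
-- (setdefault+append == overwrite key with its current value, default [], extended by n)
def pvGStep (d : PySem.Dict String (List Int)) (n : Int) : PySem.Dict String (List Int) :=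
  let k := if PySem.Int.mod n 2 == 0 then "evens" else "odds"
  d.insert k (d.getD k [] ++ [n])

def findOddsEvens_alt (LoL : List (List Int)) : List (String × List Int) :=
  ((LoL.foldl (fun acc sub => sub.foldl pvSeenStep acc) []).foldl pvGStep PySem.Dict.empty).items

-- ===== PRECONDITION & SPEC =====
def Spec_findOddsEvens (LoL : List (List Int)) (out : List (String × List Int)) : Prop := out = findOddsEvens_alt LoL
instance (LoL : List (List Int)) (out : List (String × List Int)) : Decidable (Spec_findOddsEvens LoL out) := by unfold Spec_findOddsEvens; infer_instance

-- ===== CLAIM (what is proved, stated in full; the proofs are below) =====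
def Claim_equal_findOddsEvens : Prop := ∀ (LoL : List (List Int)), Dom_findOddsEvens LoL → Spec_findOddsEvens LoL (findOddsEvens LoL)

-- ===== LEMMAS AND PROOFS =====

def pvEv (l : List Int) : List Int := l.filter (fun n => PySem.Int.mod n 2 == 0)
def pvOd (l : List Int) : List Int := l.filter (fun n => !(PySem.Int.mod n 2 == 0))
def pvDD (l : List Int) : List Int := l.foldl pvSeenStep []

-- the dict both programs end up with, as a function of the deduped flattened input
def pvMkD : List Int → PySem.Dict String (List Int)
  | [] => PySem.Dict.empty
  | h :: t =>
    if PySem.Int.mod h 2 == 0 then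
      (if pvOd (h :: t) = [] then PySem.Dict.empty.insert "evens" (pvEv (h :: t))
       else (PySem.Dict.empty.insert "evens" (pvEv (h :: t))).insert "odds" (pvOd (h :: t)))
    else
      (if pvEv (h :: t) = [] then PySem.Dict.empty.insert "odds" (pvOd (h :: t))
       else (PySem.Dict.empty.insert "odds" (pvOd (h :: t))).insert "evens" (pvEv (h :: t)))

def pvInv (flat : List Int) :
    List Int × List Int × List Int × List Int × PySem.Dict String (List Int) :=
  (pvDD (pvEv flat), pvDD (pvOd flat), pvEv flat, pvOd flat, pvMkD (pvDD flat))

lemma mem_seenStep (acc : List Int) (n x : Int) :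
    x ∈ pvSeenStep acc n ↔ x ∈ acc ∨ x = n := by
  unfold pvSeenStep
  by_cases hc : n ∈ acc
  · rw [if_pos hc]
    exact ⟨fun hx => Or.inl hx, fun hx => hx.elim id (fun he => he ▸ hc)⟩
  · rw [if_neg hc]; simp

lemma mem_foldl_seen (xs : List Int) (acc : List Int) (x : Int) :
    x ∈ xs.foldl pvSeenStep acc ↔ x ∈ acc ∨ x ∈ xs := by
  induction xs generalizing acc with
  | nil => simp
  | cons m xs ih =>
    rw [List.foldl_cons, ih, mem_seenStep, List.mem_cons]
    tauto

lemma mem_pvDD (l : List Int) (x : Int) : x ∈ pvDD l ↔ x ∈ l := by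
  unfold pvDD; rw [mem_foldl_seen]; simp

lemma pvDD_snoc (l : List Int) (n : Int) : pvDD (l ++ [n]) = pvSeenStep (pvDD l) n := by
  unfold pvDD; rw [List.foldl_append, List.foldl_cons, List.foldl_nil]

lemma filter_seenStep (p : Int → Bool) (acc : List Int) (m : Int) :
    (pvSeenStep acc m).filter p
      = if p m = true then pvSeenStep (acc.filter p) m else acc.filter p := by
  unfold pvSeenStep
  by_cases hc : m ∈ acc
  · rw [if_pos hc]
    by_cases hp : p m = true
    · rw [if_pos hp, if_pos (List.mem_filter.2 ⟨hc, hp⟩)]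
    · rw [if_neg hp]
  · rw [if_neg hc, List.filter_append]
    by_cases hp : p m = true
    · rw [if_pos hp, if_neg (fun hmm => hc (List.mem_filter.1 hmm).1),
        List.filter_cons, if_pos hp, List.filter_nil]
    · rw [if_neg hp, List.filter_cons, if_neg hp, List.filter_nil, List.append_nil]

lemma filter_foldl_seen (p : Int → Bool) (xs acc : List Int) :
    (xs.foldl pvSeenStep acc).filter p = (xs.filter p).foldl pvSeenStep (acc.filter p) := by
  induction xs generalizing acc with
  | nil => rfl
  | cons m xs ih =>
    rw [List.foldl_cons, ih, filter_seenStep]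
    by_cases hp : p m = true
    · rw [if_pos hp, List.filter_cons, if_pos hp, List.foldl_cons]
    · rw [if_neg hp, List.filter_cons, if_neg hp]

lemma pvEv_pvDD (l : List Int) : pvEv (pvDD l) = pvDD (pvEv l) := by
  unfold pvEv pvDD
  exact filter_foldl_seen _ l []

lemma pvOd_pvDD (l : List Int) : pvOd (pvDD l) = pvDD (pvOd l) := by
  unfold pvOd pvDD
  exact filter_foldl_seen _ l []

lemma pvEv_snoc_e (l : List Int) (n : Int) (hd : (2:Int) ∣ n) :
    pvEv (l ++ [n]) = pvEv l ++ [n] := by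
  unfold pvEv; rw [List.filter_append]; simp [hd]

lemma pvOd_snoc_e (l : List Int) (n : Int) (hd : (2:Int) ∣ n) :
    pvOd (l ++ [n]) = pvOd l := by
  unfold pvOd; rw [List.filter_append]; simp [hd]

lemma pvEv_snoc_o (l : List Int) (n : Int) (hnd : ¬(2:Int) ∣ n) :
    pvEv (l ++ [n]) = pvEv l := by
  unfold pvEv; rw [List.filter_append]; simp [hnd]

lemma pvOd_snoc_o (l : List Int) (n : Int) (hm : n % 2 = 1) :
    pvOd (l ++ [n]) = pvOd l ++ [n] := by
  unfold pvOd; rw [List.filter_append]; simp [hm]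

lemma foldl_dstep_noop (k : String) (xs L : List Int) (d : PySem.Dict String (List Int))
    (h : ∀ x ∈ xs, x ∈ L) :
    xs.foldl (pvDStep k) (L, d) = (L, d) := by
  induction xs with
  | nil => rfl
  | cons a xs ih =>
    rw [List.foldl_cons]
    have hstep : pvDStep k (L, d) a = (L, d) := by
      simp [pvDStep, h a (by simp)]
    rw [hstep]
    exact ih (fun x hx => h x (List.mem_cons_of_mem _ hx))

-- Dict overwrite identities for the two concrete keys
lemma dict_over_ee (v v' : List Int) :
    (PySem.Dict.empty.insert "evens" v).insert "evens" v' = PySem.Dict.empty.insert "evens" v' := rfl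

lemma dict_over_eoe (v w v' : List Int) :
    ((PySem.Dict.empty.insert "evens" v).insert "odds" w).insert "evens" v'
      = (PySem.Dict.empty.insert "evens" v').insert "odds" w := rfl

lemma dict_over_oee (w v v' : List Int) :
    ((PySem.Dict.empty.insert "odds" w).insert "evens" v).insert "evens" v'
      = (PySem.Dict.empty.insert "odds" w).insert "evens" v' := rfl

lemma dict_over_oo (w w' : List Int) :
    (PySem.Dict.empty.insert "odds" w).insert "odds" w' = PySem.Dict.empty.insert "odds" w' := rfl

lemma dict_over_oeo (w v w' : List Int) :
    ((PySem.Dict.empty.insert "odds" w).insert "evens" v).insert "odds" w'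
      = (PySem.Dict.empty.insert "odds" w').insert "evens" v := rfl

lemma dict_over_eoo (v w w' : List Int) :
    ((PySem.Dict.empty.insert "evens" v).insert "odds" w).insert "odds" w'
      = (PySem.Dict.empty.insert "evens" v).insert "odds" w' := rfl

lemma pvMkD_snoc_even (s : List Int) (n : Int) (hd : (2:Int) ∣ n) :
    pvMkD (s ++ [n]) = (pvMkD s).insert "evens" (pvEv s ++ [n]) := by
  have heb : (PySem.Int.mod n 2 == 0) = true := by simpa using hd
  cases s with
  | nil =>
    have h1 : pvOd [n] = [] := by unfold pvOd; simp [hd]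
    have h2 : pvEv [n] = [n] := by unfold pvEv; simp [hd]
    show pvMkD [n] = (pvMkD []).insert "evens" (pvEv [] ++ [n])
    simp only [pvMkD]
    rw [if_pos heb, if_pos h1, h2]
    rfl
  | cons h t =>
    have hev : pvEv ((h :: t) ++ [n]) = pvEv (h :: t) ++ [n] := pvEv_snoc_e _ _ hd
    have hod : pvOd ((h :: t) ++ [n]) = pvOd (h :: t) := pvOd_snoc_e _ _ hd
    rw [List.cons_append]
    simp only [pvMkD]
    rw [← List.cons_append, hev, hod]
    by_cases hhb : (PySem.Int.mod h 2 == 0) = true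
    · rw [if_pos hhb, if_pos hhb]
      by_cases ho : pvOd (h :: t) = []
      · rw [if_pos ho, if_pos ho, dict_over_ee]
      · rw [if_neg ho, if_neg ho, dict_over_eoe]
    · rw [if_neg hhb, if_neg hhb]
      have hne : pvEv (h :: t) ++ [n] ≠ [] := by simp
      by_cases hpe : pvEv (h :: t) = []
      · rw [if_neg hne, if_pos hpe]
      · rw [if_neg hne, if_neg hpe, dict_over_oee]

lemma pvMkD_snoc_odd (s : List Int) (n : Int) (hnd : ¬(2:Int) ∣ n) :
    pvMkD (s ++ [n]) = (pvMkD s).insert "odds" (pvOd s ++ [n]) := by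
  have hm : n % 2 = 1 := by omega
  have heb : (PySem.Int.mod n 2 == 0) = false := by simpa using hnd
  have hebn : ¬((PySem.Int.mod n 2 == 0) = true) := by rw [heb]; simp
  cases s with
  | nil =>
    have h1 : pvEv [n] = [] := by unfold pvEv; simp [hnd]
    have h2 : pvOd [n] = [n] := by unfold pvOd; simp [hm]
    show pvMkD [n] = (pvMkD []).insert "odds" (pvOd [] ++ [n])
    simp only [pvMkD]
    rw [if_neg hebn, if_pos h1, h2]
    rfl
  | cons h t =>
    have hev : pvEv ((h :: t) ++ [n]) = pvEv (h :: t) := pvEv_snoc_o _ _ hnd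
    have hod : pvOd ((h :: t) ++ [n]) = pvOd (h :: t) ++ [n] := pvOd_snoc_o _ _ hm
    rw [List.cons_append]
    simp only [pvMkD]
    rw [← List.cons_append, hev, hod]
    by_cases hhb : (PySem.Int.mod h 2 == 0) = true
    · rw [if_pos hhb, if_pos hhb]
      have hone : pvOd (h :: t) ++ [n] ≠ [] := by simp
      by_cases ho : pvOd (h :: t) = []
      · rw [if_neg hone, if_pos ho]
      · rw [if_neg hone, if_neg ho, dict_over_eoo]
    · rw [if_neg hhb, if_neg hhb]
      by_cases hpe : pvEv (h :: t) = []
      · rw [if_pos hpe, if_pos hpe, dict_over_oo]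
      · rw [if_neg hpe, if_neg hpe, dict_over_oeo]

lemma stepA_inv (flat : List Int) (n : Int) :
    pvStepA (pvInv flat) n = pvInv (flat ++ [n]) := by
  by_cases hd : (2:Int) ∣ n
  · have heb : (PySem.Int.mod n 2 == 0) = true := by simpa using hd
    have hev : pvEv (flat ++ [n]) = pvEv flat ++ [n] := pvEv_snoc_e _ _ hd
    have hod : pvOd (flat ++ [n]) = pvOd flat := pvOd_snoc_e _ _ hd
    simp only [pvInv, pvStepA]
    rw [if_pos heb]
    rw [foldl_dstep_noop "odds" (pvOd flat) (pvDD (pvOd flat)) (pvMkD (pvDD flat))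
          (fun x hx => (mem_pvDD _ _).2 hx)]
    rw [List.foldl_append,
        foldl_dstep_noop "evens" (pvEv flat) (pvDD (pvEv flat)) (pvMkD (pvDD flat))
          (fun x hx => (mem_pvDD _ _).2 hx),
        List.foldl_cons, List.foldl_nil]
    rw [hev, hod, pvDD_snoc, pvDD_snoc]
    by_cases hc : n ∈ pvDD (pvEv flat)
    · have hnf : n ∈ flat := by
        have h2 : n ∈ pvEv flat := (mem_pvDD _ _).1 hc
        exact (List.mem_filter.1 h2).1
      have hcd : n ∈ pvDD flat := (mem_pvDD _ _).2 hnf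
      simp [pvDStep, pvSeenStep, hc, hcd]
    · have hnf : n ∉ flat := fun hin => hc ((mem_pvDD _ _).2 (List.mem_filter.2 ⟨hin, heb⟩))
      have hcd : n ∉ pvDD flat := fun hin => hnf ((mem_pvDD _ _).1 hin)
      simp only [pvDStep, pvSeenStep, if_neg hc, if_neg hcd]
      rw [pvMkD_snoc_even (pvDD flat) n hd, pvEv_pvDD]
  · have heb : (PySem.Int.mod n 2 == 0) = false := by simpa using hd
    have hebn : ¬((PySem.Int.mod n 2 == 0) = true) := by rw [heb]; simp
    have hm : n % 2 = 1 := by omega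
    have hpodd : (!(PySem.Int.mod n 2 == 0)) = true := by rw [heb]; rfl
    have hev : pvEv (flat ++ [n]) = pvEv flat := pvEv_snoc_o _ _ hd
    have hod : pvOd (flat ++ [n]) = pvOd flat ++ [n] := pvOd_snoc_o _ _ hm
    simp only [pvInv, pvStepA]
    rw [if_neg hebn]
    rw [List.foldl_append,
        foldl_dstep_noop "odds" (pvOd flat) (pvDD (pvOd flat)) (pvMkD (pvDD flat))
          (fun x hx => (mem_pvDD _ _).2 hx),
        List.foldl_cons, List.foldl_nil]
    by_cases hc : n ∈ pvDD (pvOd flat)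
    · have hnf : n ∈ flat := by
        have h2 : n ∈ pvOd flat := (mem_pvDD _ _).1 hc
        exact (List.mem_filter.1 h2).1
      have hcd : n ∈ pvDD flat := (mem_pvDD _ _).2 hnf
      rw [show pvDStep "odds" (pvDD (pvOd flat), pvMkD (pvDD flat)) n
            = (pvDD (pvOd flat), pvMkD (pvDD flat)) from by simp [pvDStep, hc]]
      rw [foldl_dstep_noop "evens" (pvEv flat) (pvDD (pvEv flat)) (pvMkD (pvDD flat))
            (fun x hx => (mem_pvDD _ _).2 hx)]
      rw [hev, hod, pvDD_snoc, pvDD_snoc]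
      simp [pvSeenStep, hc, hcd]
    · have hnf : n ∉ flat := fun hin =>
        hc ((mem_pvDD _ _).2 (List.mem_filter.2 ⟨hin, hpodd⟩))
      have hcd : n ∉ pvDD flat := fun hin => hnf ((mem_pvDD _ _).1 hin)
      rw [show pvDStep "odds" (pvDD (pvOd flat), pvMkD (pvDD flat)) n
            = (pvDD (pvOd flat) ++ [n], (pvMkD (pvDD flat)).insert "odds" (pvDD (pvOd flat) ++ [n]))
          from by simp [pvDStep, hc]]
      rw [foldl_dstep_noop "evens" (pvEv flat) (pvDD (pvEv flat))
            ((pvMkD (pvDD flat)).insert "odds" (pvDD (pvOd flat) ++ [n]))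
            (fun x hx => (mem_pvDD _ _).2 hx)]
      rw [hev, hod, pvDD_snoc, pvDD_snoc]
      simp only [pvSeenStep, if_neg hc, if_neg hcd]
      rw [pvMkD_snoc_odd (pvDD flat) n hd, pvOd_pvDD]

lemma foldl_stepA_inv (flat : List Int) :
    flat.foldl pvStepA ([], [], [], [], PySem.Dict.empty) = pvInv flat := by
  induction flat using List.reverseRecOn with
  | nil => rfl
  | append_singleton l n ih =>
    rw [List.foldl_append, ih, List.foldl_cons, List.foldl_nil, stepA_inv]

lemma A_eq (LoL : List (List Int)) :
    findOddsEvens LoL = (pvMkD (pvDD LoL.flatten)).items := by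
  unfold findOddsEvens
  rw [← List.foldl_flatten, foldl_stepA_inv]
  rfl

-- lookups in the invariant dict
lemma getD_pvMkD_evens (s : List Int) : (pvMkD s).getD "evens" [] = pvEv s := by
  cases s with
  | nil => rfl
  | cons h t =>
    simp only [pvMkD]
    by_cases hhb : (PySem.Int.mod h 2 == 0) = true
    · rw [if_pos hhb]
      by_cases ho : pvOd (h :: t) = []
      · rw [if_pos ho, PySem.Dict.getD_insert_self]
      · rw [if_neg ho,
          PySem.Dict.getD_insert_of_ne _ _ _ (by decide : ("evens":String) ≠ "odds"),
          PySem.Dict.getD_insert_self]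
    · rw [if_neg hhb]
      by_cases hpe : pvEv (h :: t) = []
      · rw [if_pos hpe,
          PySem.Dict.getD_insert_of_ne _ _ _ (by decide : ("evens":String) ≠ "odds"),
          PySem.Dict.getD_empty, hpe]
      · rw [if_neg hpe, PySem.Dict.getD_insert_self]

lemma getD_pvMkD_odds (s : List Int) : (pvMkD s).getD "odds" [] = pvOd s := by
  cases s with
  | nil => rfl
  | cons h t =>
    simp only [pvMkD]
    by_cases hhb : (PySem.Int.mod h 2 == 0) = true
    · rw [if_pos hhb]
      by_cases ho : pvOd (h :: t) = []
      · rw [if_pos ho,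
          PySem.Dict.getD_insert_of_ne _ _ _ (by decide : ("odds":String) ≠ "evens"),
          PySem.Dict.getD_empty, ho]
      · rw [if_neg ho, PySem.Dict.getD_insert_self]
    · rw [if_neg hhb]
      by_cases hpe : pvEv (h :: t) = []
      · rw [if_pos hpe, PySem.Dict.getD_insert_self]
      · rw [if_neg hpe,
          PySem.Dict.getD_insert_of_ne _ _ _ (by decide : ("odds":String) ≠ "evens"),
          PySem.Dict.getD_insert_self]

-- B's grouping fold over any prefix of the deduped sequence builds exactly the invariant dict
lemma foldl_gstep_eq (s : List Int) : s.foldl pvGStep PySem.Dict.empty = pvMkD s := by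
  induction s using List.reverseRecOn with
  | nil => rfl
  | append_singleton l n ih =>
    rw [List.foldl_append, ih, List.foldl_cons, List.foldl_nil]
    by_cases hd : (2:Int) ∣ n
    · have heb : (PySem.Int.mod n 2 == 0) = true := by simpa using hd
      simp only [pvGStep, if_pos heb]
      rw [getD_pvMkD_evens, pvMkD_snoc_even _ _ hd]
    · have heb : (PySem.Int.mod n 2 == 0) = false := by simpa using hd
      have hebn : ¬((PySem.Int.mod n 2 == 0) = true) := by rw [heb]; simp
      simp only [pvGStep, if_neg hebn]
      rw [getD_pvMkD_odds, pvMkD_snoc_odd _ _ hd]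

lemma B_eq (LoL : List (List Int)) :
    findOddsEvens_alt LoL = (pvMkD (pvDD LoL.flatten)).items := by
  unfold findOddsEvens_alt
  rw [← List.foldl_flatten]
  rw [show (LoL.flatten.foldl pvSeenStep [] : List Int) = pvDD LoL.flatten from rfl]
  rw [foldl_gstep_eq]

-- ===== VERDICT (by name: the statement is the Claim_ definition above) =====
theorem findOddsEvens_spec : Claim_equal_findOddsEvens := by
  intro LoL _
  unfold Spec_findOddsEvens
  rw [A_eq, B_eq]
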